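-- pv_equiv track=rewrite | github.com/k-harada/AtCoder | other_contests/MMA017/B.py | solve
-- ===== SOURCE A (Python) =====
-- def solve(n, m, a_list):
--     # (a + b)^2 >= a^2 + b^2なので、
--     # 難易度の小さい順に並べたとき、間を飛ばす理由がない
--     if m == 1:
--         return 0
--     d_list = []
--     a_list_s = list(sorted(a_list))
--     for i in range(n - 1):
--         d_list.append((a_list_s[i + 1] - a_list_s[i]) ** 2)
--     r = sum(d_list[:(m - 1)])
--     res = r
--     for i in range(m - 1, n - 1):
--         r += d_list[i]
--         r -= d_list[i - (m - 1)]
--         res = min(res, r)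
--     return res
-- ===== SOURCE B (Python) =====
-- def solve(n, m, a_list):
--     if m == 1:
--         return 0
--     s = sorted(a_list)
--     p = [0]
--     for i in range(n - 1):
--         p.append(p[-1] + (s[i + 1] - s[i]) ** 2)
--     return min((p[i + m - 1] - p[i] for i in range(n - m + 1)), default=0)
-- ===== Notes on version B (the rewrite author's own statement) =====
-- stated objective: alternative
-- what changed: Replaces A's add-one/drop-one rolling-window accumulator with a prefix-sum table of the squared gaps and a single minimum over the window differences p[i+m-1]-p[i].
-- intended difference: On inputs with 2 <= n < m (more picks than problems) A returns the sum of ALL squared gaps, an artifact of the clamped slice d_list[:(m-1)], while B returns 0, the minimum over the empty set of windows (default=0), the intended value on this out-of-contract corner. — e.g. on solve(2, 3, [1, 5]): A returns 16, B returns 0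
-- outside the precondition, e.g. on solve(-1, -1, []): A returns 0, B raises IndexError
import Mathlib
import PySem

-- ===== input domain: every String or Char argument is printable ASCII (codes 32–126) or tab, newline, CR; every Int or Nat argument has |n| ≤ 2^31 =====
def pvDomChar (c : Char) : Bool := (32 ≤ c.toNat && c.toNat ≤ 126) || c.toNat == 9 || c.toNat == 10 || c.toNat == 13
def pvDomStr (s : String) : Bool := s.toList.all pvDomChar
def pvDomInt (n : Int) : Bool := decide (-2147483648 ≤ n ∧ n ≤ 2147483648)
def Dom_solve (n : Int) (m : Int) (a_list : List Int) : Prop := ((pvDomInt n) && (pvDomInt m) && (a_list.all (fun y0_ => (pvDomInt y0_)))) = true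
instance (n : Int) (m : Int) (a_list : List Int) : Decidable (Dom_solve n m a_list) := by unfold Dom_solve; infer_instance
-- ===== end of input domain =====

-- B replaces A's add-one/drop-one rolling-window accumulator with a prefix-sum table of the
-- squared gaps and a minimum over window differences (objective: alternative decomposition).


-- ===== PORT A =====
def solve (n : Int) (m : Int) (a_list : List Int) : Int :=
  if m = 1 then 0
  else
    let a_list_s := PySem.List.sorted a_list (fun x => x) false
    let d_list := (PySem.List.pyRange 0 (n - 1) 1).foldl
      (fun d i => d ++ [(PySem.List.pyGetD a_list_s (i + 1) 0 - PySem.List.pyGetD a_list_s i 0) ^ 2]) []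
    let r := (PySem.List.slice d_list none (some (m - 1))).sum
    let st := (PySem.List.pyRange (m - 1) (n - 1) 1).foldl
      (fun (st : Int × Int) i =>
        let r' := st.1 + PySem.List.pyGetD d_list i 0 - PySem.List.pyGetD d_list (i - (m - 1)) 0
        (r', min st.2 r')) (r, r)
    st.2

-- ===== PORT B =====
def solve_alt (n : Int) (m : Int) (a_list : List Int) : Int :=
  if m = 1 then 0
  else
    let s := PySem.List.sorted a_list (fun x => x) false
    let p := (PySem.List.pyRange 0 (n - 1) 1).foldl
      (fun p i => p ++ [PySem.List.pyGetD p (-1) 0 + (PySem.List.pyGetD s (i + 1) 0 - PySem.List.pyGetD s i 0) ^ 2]) [0]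
    (PySem.List.min? ((PySem.List.pyRange 0 (n - m + 1) 1).map
      (fun i => PySem.List.pyGetD p (i + m - 1) 0 - PySem.List.pyGetD p i 0)) (fun x => x)).getD 0

-- ===== PRECONDITION & SPEC =====
-- Pre_ admits exactly the inputs on which BOTH programs return: it excludes the inputs where
-- A raises IndexError (2 ≤ n and n > len(a_list); most m ≤ 0 inputs, via negative-index
-- wraparound) and the inputs m = n ≤ -1, where A happens to return 0 but B's p[m-1] lookup
-- raises IndexError.
def Pre_solve (n : Int) (m : Int) (a_list : List Int) : Prop :=
  m = 1 ∨ (2 ≤ m ∧ (n ≤ 1 ∨ n ≤ (a_list.length : Int))) ∨ (m ≤ 0 ∧ n < m) ∨ (m = 0 ∧ n = 0)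
instance (n : Int) (m : Int) (a_list : List Int) : Decidable (Pre_solve n m a_list) := by
  unfold Pre_solve; infer_instance
def pvWitness_solve : Int × Int × List Int := (3, 2, [1, 5, 2])
-- On 2 ≤ n < m (more picks than problems exist) A returns the sum of ALL squared gaps — an
-- artifact of the clamped slice d_list[:(m-1)] — while B returns 0, the minimum over the
-- (empty) set of windows, which is the intended value on this out-of-contract corner.
def D_solve (n : Int) (m : Int) (a_list : List Int) : Prop := 2 ≤ m ∧ 2 ≤ n ∧ n < m
instance (n : Int) (m : Int) (a_list : List Int) : Decidable (D_solve n m a_list) := by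
  unfold D_solve; infer_instance
def Spec_solve (n : Int) (m : Int) (a_list : List Int) (out : Int) : Prop := ¬ D_solve n m a_list → out = solve_alt n m a_list
instance (n : Int) (m : Int) (a_list : List Int) (out : Int) : Decidable (Spec_solve n m a_list out) := by unfold Spec_solve; infer_instance
def pvDiffWitness_solve : Int × Int × List Int := (2, 3, [1, 5])
def pvDiffWitnessOut_solve : Int × Int := (16, 0)

-- ===== CLAIM (what is proved, stated in full; the proofs are below) =====
def Claim_unchanged_solve : Prop := ∀ (n : Int) (m : Int) (a_list : List Int), Dom_solve n m a_list → Pre_solve n m a_list → Spec_solve n m a_list (solve n m a_list)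
def Claim_changed_solve : Prop := Dom_solve (pvDiffWitness_solve.1) (pvDiffWitness_solve.2.1) (pvDiffWitness_solve.2.2) ∧ Pre_solve (pvDiffWitness_solve.1) (pvDiffWitness_solve.2.1) (pvDiffWitness_solve.2.2) ∧ D_solve (pvDiffWitness_solve.1) (pvDiffWitness_solve.2.1) (pvDiffWitness_solve.2.2) ∧ solve (pvDiffWitness_solve.1) (pvDiffWitness_solve.2.1) (pvDiffWitness_solve.2.2) = pvDiffWitnessOut_solve.1 ∧ solve_alt (pvDiffWitness_solve.1) (pvDiffWitness_solve.2.1) (pvDiffWitness_solve.2.2) = pvDiffWitnessOut_solve.2 ∧ pvDiffWitnessOut_solve.1 ≠ pvDiffWitnessOut_solve.2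

-- ===== LEMMAS AND PROOFS =====

-- the squared gap between consecutive elements of s at position i
def pvGap (s : List Int) (i : Int) : Int :=
  (PySem.List.pyGetD s (i + 1) 0 - PySem.List.pyGetD s i 0) ^ 2

-- prefix sums of f over 0,1,…,j-1
def pvPrefix (f : Int → Int) (j : Nat) : Int := ((List.range j).map (fun t : Nat => f (t : Int))).sum

-- window sum starting at i, of length k
def pvW (f : Int → Int) (k i : Nat) : Int := pvPrefix f (i + k) - pvPrefix f i

theorem pvPrefix_succ (f : Int → Int) (j : Nat) : pvPrefix f (j + 1) = pvPrefix f j + f j := by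
  simp [pvPrefix, List.range_succ]

theorem pvW_succ (f : Int → Int) (k T : Nat) :
    pvW f k (T + 1) = pvW f k T + f ((k : Int) + T) - f (T : Int) := by
  have h1 : T + 1 + k = (T + k) + 1 := by omega
  have h2 : ((T + k : Nat) : Int) = (k : Int) + T := by push_cast; ring
  rw [pvW, pvW, h1, pvPrefix_succ, pvPrefix_succ, h2]
  ring

-- A's rolling-window loop, in pure form
theorem pvALoop (f : Int → Int) (k : Nat) (T : Nat) :
    (List.range T).foldl (fun (st : Int × Int) (j : Nat) =>
        (st.1 + f ((k : Int) + j) - f (j : Int),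
         min st.2 (st.1 + f ((k : Int) + j) - f (j : Int))))
      (pvW f k 0, pvW f k 0)
    = (pvW f k T, ((List.range T).map (fun j => pvW f k (j + 1))).foldl min (pvW f k 0)) := by
  induction T with
  | zero => simp
  | succ T ih =>
    rw [List.range_succ, List.foldl_append, ih, List.map_append, List.foldl_append]
    simp [pvW_succ]

-- B's prefix-sum table construction, in pure form
theorem pvPList (f : Int → Int) (N : Nat) :
    (List.range N).foldl (fun (p : List Int) (j : Nat) =>
        p ++ [PySem.List.pyGetD p (-1) 0 + f (j : Int)]) [0]
    = (List.range (N + 1)).map (pvPrefix f) := by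
  induction N with
  | zero => simp [pvPrefix]
  | succ N ih =>
    rw [List.range_succ, List.foldl_append, ih]
    rw [List.range_succ (n := N + 1), List.map_append]
    have hsplit : (List.range (N + 1)).map (pvPrefix f)
        = (List.range N).map (pvPrefix f) ++ [pvPrefix f N] := by
      rw [List.range_succ, List.map_append]; rfl
    rw [hsplit]
    simp [PySem.List.pyGetD_neg_one_append_singleton, pvPrefix_succ]

-- A equals the minimum of the window sums W 0, W 1, …, W (n-m)
theorem solveA_closed (n m : Int) (a_list : List Int) (hm1 : m ≠ 1) (h2m : 2 ≤ m) (hmn : m ≤ n) :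
    solve n m a_list =
      ((List.range (n - m).toNat).map
        (fun j => pvW (pvGap (PySem.List.sorted a_list (fun x => x) false)) (m - 1).toNat (j + 1))).foldl
        min (pvW (pvGap (PySem.List.sorted a_list (fun x => x) false)) (m - 1).toNat 0) := by
  unfold solve
  rw [if_neg hm1]
  set s := PySem.List.sorted a_list (fun x => x) false with hs
  simp only [PySem.List.foldl_append_singleton_eq_map, List.nil_append]
  have hgap : (fun i => (PySem.List.pyGetD s (i + 1) 0 - PySem.List.pyGetD s i 0) ^ 2) = pvGap s := rfl
  rw [hgap]
  set k : Nat := (m - 1).toNat with hkdef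
  set T : Nat := (n - m).toNat with hTdef
  have hk : (m - 1 : Int) = (k : Int) := by omega
  have hT : (n - m : Int) = (T : Int) := by omega
  have hr : (PySem.List.slice ((PySem.List.pyRange 0 (n - 1) 1).map (pvGap s)) none (some (m - 1))).sum
      = pvW (pvGap s) k 0 := by
    rw [PySem.List.slice_to _ (by omega : (0:Int) ≤ m - 1)]
    rw [PySem.List.pyRange_zero, ← List.map_take, ← List.map_take, List.take_range]
    have hmin : min (m - 1).toNat (n - 1).toNat = k := by omega
    rw [hmin, List.map_map, pvW, pvPrefix, pvPrefix]
    simp only [Nat.zero_add, List.range_zero, List.map_nil, List.sum_nil, sub_zero]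
    rfl
  rw [hr]
  rw [PySem.List.pyRange_one (m - 1) (n - 1)]
  rw [show (n - 1 - (m - 1)).toNat = T from by omega]
  rw [hk]
  rw [List.foldl_map]
  rw [PySem.List.foldl_congr_mem _ _ (fun (st : Int × Int) (j : Nat) =>
        (st.1 + pvGap s ((k : Int) + j) - pvGap s (j : Int),
         min st.2 (st.1 + pvGap s ((k : Int) + j) - pvGap s (j : Int)))) _ ?hcong]
  · rw [pvALoop]
  case hcong =>
    intro acc j hj
    have hjT : j < T := List.mem_range.mp hj
    have h1 : PySem.List.pyGetD (List.map (pvGap s) (PySem.List.pyRange 0 (n - 1) 1)) ((k : Int) + (j : Int)) 0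
        = pvGap s ((k : Int) + j) :=
      PySem.List.pyGetD_map_pyRange_of_nonneg _ _ _ _ (by omega) (by omega)
    have h2 : PySem.List.pyGetD (List.map (pvGap s) (PySem.List.pyRange 0 (n - 1) 1)) ((k : Int) + (j : Int) - (k : Int)) 0
        = pvGap s ((j : Int)) := by
      rw [show (k : Int) + (j : Int) - (k : Int) = (j : Int) from by ring]
      exact PySem.List.pyGetD_map_pyRange_of_nonneg _ _ _ _ (by omega) (by omega)
    simp only [h1, h2]

-- B equals the same minimum of window sums
theorem solveB_closed (n m : Int) (a_list : List Int) (hm1 : m ≠ 1) (h2m : 2 ≤ m) (hmn : m ≤ n) :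
    solve_alt n m a_list =
      ((List.range (n - m).toNat).map
        (fun j => pvW (pvGap (PySem.List.sorted a_list (fun x => x) false)) (m - 1).toNat (j + 1))).foldl
        min (pvW (pvGap (PySem.List.sorted a_list (fun x => x) false)) (m - 1).toNat 0) := by
  unfold solve_alt
  rw [if_neg hm1]
  set s := PySem.List.sorted a_list (fun x => x) false with hs
  set k : Nat := (m - 1).toNat with hkdef
  set T : Nat := (n - m).toNat with hTdef
  have hk : (m - 1 : Int) = (k : Int) := by omega
  have hN : (n - 1).toNat = T + k := by omega
  simp only [PySem.List.pyRange_zero (n - 1), List.foldl_map]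
  have hbody : (fun (p : List Int) (j : Nat) =>
      p ++ [PySem.List.pyGetD p (-1) 0 + (PySem.List.pyGetD s ((j : Int) + 1) 0 - PySem.List.pyGetD s (j : Int) 0) ^ 2])
      = (fun (p : List Int) (j : Nat) => p ++ [PySem.List.pyGetD p (-1) 0 + pvGap s (j : Int)]) := rfl
  rw [hbody, pvPList (pvGap s) (n - 1).toNat, hN]
  rw [PySem.List.pyRange_zero (n - m + 1), List.map_map]
  rw [show (n - m + 1).toNat = T + 1 from by omega]
  rw [List.map_congr_left (g := fun (j : Nat) => pvW (pvGap s) k j) ?hmap]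
  · rw [List.range_succ_eq_map, List.map_cons, PySem.List.min?_id_cons, Option.getD_some, List.map_map]
    simp only [Function.comp_def, Nat.succ_eq_add_one]
    rw [List.foldl_map]
  case hmap =>
    intro j hj
    have hjT : j < T + 1 := List.mem_range.mp hj
    simp only [Function.comp_def]
    have h1 : ((j : Int) + m - 1) = ((j + k : Nat) : Int) := by push_cast; omega
    rw [h1, PySem.List.pyGetD_natCast, PySem.List.pyGetD_natCast,
        PySem.List.getD_map_range _ _ _ _ (by omega), PySem.List.getD_map_range _ _ _ _ (by omega)]
    rfl

-- both programs return 0 when there is no gap and no window (n ≤ 1 or n < m ≤ 0)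
theorem solve_deg (n m : Int) (a_list : List Int) (hm1 : m ≠ 1) (hn1 : n ≤ 1) (hnm : n < m) :
    solve n m a_list = solve_alt n m a_list := by
  unfold solve solve_alt
  rw [if_neg hm1, if_neg hm1]
  rw [PySem.List.pyRange_one_eq_nil (show (n - 1 : Int) ≤ 0 by omega),
      PySem.List.pyRange_one_eq_nil (show (n - 1 : Int) ≤ m - 1 by omega),
      PySem.List.pyRange_one_eq_nil (show (n - m + 1 : Int) ≤ 0 by omega)]
  simp [PySem.List.slice, PySem.List.min?]

-- the fully degenerate point n = m = 0: both programs return 0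
theorem solve_zero (a_list : List Int) : solve 0 0 a_list = solve_alt 0 0 a_list := by
  unfold solve solve_alt
  norm_num
  decide

-- ===== VERDICT (by name: the statement is the Claim_ definition above) =====
theorem solve_spec : Claim_unchanged_solve := by
  intro n m a_list _ hpre
  unfold Spec_solve
  intro hD
  by_cases hm1 : m = 1
  · simp [solve, solve_alt, hm1]
  · unfold Pre_solve at hpre
    unfold D_solve at hD
    rcases hpre with h | ⟨h2m, hcase⟩ | ⟨hm0, hnm⟩ | ⟨hm0, hn0⟩
    · exact absurd h hm1
    · by_cases hn1 : n ≤ 1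
      · exact (solve_deg n m a_list hm1 hn1 (by omega)).symm ▸ rfl
      · have hmn : m ≤ n := by omega
        rw [solveA_closed n m a_list hm1 h2m hmn, solveB_closed n m a_list hm1 h2m hmn]
    · exact solve_deg n m a_list hm1 (by omega) hnm
    · subst hm0; subst hn0; exact solve_zero a_list

theorem solve_changed : Claim_changed_solve := by unfold Claim_changed_solve; decide
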